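-- pv_equiv track=rewrite | github.com/charlie-gallagher/crossword_assistant | cw.py | cw_gen_regex
-- ===== SOURCE A (Python) =====
-- def cw_gen_regex(letters, positions, length):
--     reg_expression = "^"
--
--     for i in range(1, length+1):
--         if i in positions:
--             reg_expression += letters[positions.index(i)]
--         elif i not in positions:
--             reg_expression += "[A-Za-z]"
--     reg_expression += "\\n$"
--
--     return reg_expression
-- ===== SOURCE B (Python) =====
-- def cw_gen_regex(letters, positions, length):
--     # Scatter pass: preallocate the placeholder table, then walk positions once,
--     # first occurrence of each in-range position wins.
--     chars = ['[A-Za-z]'] * length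
--     filled = [False] * length
--     for j, pos in enumerate(positions):
--         if 1 <= pos <= length and not filled[pos - 1]:
--             filled[pos - 1] = True
--             chars[pos - 1] = letters[j]
--     return '^' + ''.join(chars) + '\\n$'
-- ===== Notes on version B (the rewrite author's own statement) =====
-- stated objective: faster
-- what changed: Instead of scanning all of range(1, length+1) and doing a membership test plus a positions.index scan for each cell, B preallocates a placeholder table and makes one scatter pass over enumerate(positions), writing each first in-range occurrence into its slot.
import Mathlib
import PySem

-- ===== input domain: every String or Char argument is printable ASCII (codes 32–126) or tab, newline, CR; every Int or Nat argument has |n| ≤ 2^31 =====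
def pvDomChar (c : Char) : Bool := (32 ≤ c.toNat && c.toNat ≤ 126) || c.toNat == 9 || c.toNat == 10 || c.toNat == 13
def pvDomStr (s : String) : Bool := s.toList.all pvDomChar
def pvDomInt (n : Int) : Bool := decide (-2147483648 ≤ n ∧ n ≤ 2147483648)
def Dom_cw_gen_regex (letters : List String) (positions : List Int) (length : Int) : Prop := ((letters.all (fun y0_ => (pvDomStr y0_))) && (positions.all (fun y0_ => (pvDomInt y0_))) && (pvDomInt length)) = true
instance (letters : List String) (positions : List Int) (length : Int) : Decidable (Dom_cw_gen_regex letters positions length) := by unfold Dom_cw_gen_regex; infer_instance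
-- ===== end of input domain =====

-- B replaces A's per-cell membership test and positions.index scan by a single scatter
-- pass over the positions into a preallocated placeholder table (objective: faster).


-- ===== PORT A =====
def cw_gen_regex (letters : List String) (positions : List Int) (length : Int) : String :=
  ((PySem.List.pyRange 1 (length + 1) 1).foldl
    (fun reg i =>
      if i ∈ positions then
        reg ++ (match PySem.List.index? positions i with
                | some j => (PySem.List.pyGet? letters (j : Int)).getD ""   -- letters[positions.index(i)]; Pre_ keeps the index in range
                | none => "")
      else if i ∉ positions then
        reg ++ "[A-Za-z]"
      else reg)
    "^") ++ "\\n$"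

-- ===== PORT B =====
-- the 'for j, pos in enumerate(positions)' loop of Source B, carrying chars and filled
def scatterLoop (letters : List String) (length : Int) (j : Nat)
    (ps : List Int) (chars : List String) (filled : List Bool) : List String :=
  match ps with
  | [] => chars
  | pos :: rest =>
    if 1 ≤ pos ∧ pos ≤ length ∧ PySem.List.pyGetD filled (pos - 1) false = false then
      scatterLoop letters length (j + 1) rest
        (chars.set (pos - 1).toNat ((PySem.List.pyGet? letters (j : Int)).getD ""))   -- letters[j]; Pre_ keeps j in range
        (filled.set (pos - 1).toNat true)
    else
      scatterLoop letters length (j + 1) rest chars filled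

def cw_gen_regex_alt (letters : List String) (positions : List Int) (length : Int) : String :=
  let chars := List.replicate length.toNat "[A-Za-z]"
  let filled := List.replicate length.toNat false
  "^" ++ PySem.Str.join "" (scatterLoop letters length 0 positions chars filled) ++ "\\n$"

-- ===== PRECONDITION & SPEC =====
-- Pre_ excludes exactly the inputs on which the Python A raises IndexError: some first
-- occurrence of an in-range position sits at an index j with no letters[j].
def Pre_cw_gen_regex (letters : List String) (positions : List Int) (length : Int) : Prop :=
  ∀ j ∈ List.range positions.length,
    (1 ≤ positions.getD j 0 ∧ positions.getD j 0 ≤ length ∧ positions.getD j 0 ∉ positions.take j)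
    → j < letters.length
instance (letters : List String) (positions : List Int) (length : Int) : Decidable (Pre_cw_gen_regex letters positions length) := by unfold Pre_cw_gen_regex; infer_instance
def pvWitness_cw_gen_regex : List String × List Int × Int := (["a", "b"], [1, 3], 3)

def Spec_cw_gen_regex (letters : List String) (positions : List Int) (length : Int) (out : String) : Prop := out = cw_gen_regex_alt letters positions length
instance (letters : List String) (positions : List Int) (length : Int) (out : String) : Decidable (Spec_cw_gen_regex letters positions length out) := by unfold Spec_cw_gen_regex; infer_instance

-- ===== CLAIM (what is proved, stated in full; the proofs are below) =====
def Claim_equal_cw_gen_regex : Prop := ∀ (letters : List String) (positions : List Int) (length : Int), Dom_cw_gen_regex letters positions length → Pre_cw_gen_regex letters positions length → Spec_cw_gen_regex letters positions length (cw_gen_regex letters positions length)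

-- ===== LEMMAS AND PROOFS =====

-- the per-cell value A computes, parametrised by the list used for membership/index
def fA (letters : List String) (ps : List Int) (i : Int) : String :=
  if i ∈ ps then
    (match PySem.List.index? ps i with
     | some j => (PySem.List.pyGet? letters (j : Int)).getD ""
     | none => "")
  else "[A-Za-z]"

lemma join_empty_cons (a : String) (rest : List String) :
    PySem.Str.join "" (a :: rest) = a ++ PySem.Str.join "" rest := by
  cases rest <;> simp [PySem.Str.join, PySem.Chars.join, List.intercalate]

lemma foldl_join (f : Int → String) :
    ∀ (l : List Int) (init : String),
      l.foldl (fun s i => s ++ f i) init = init ++ PySem.Str.join "" (l.map f) := by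
  intro l
  induction l with
  | nil =>
      intro init
      rw [List.foldl_nil, List.map_nil]
      have h : PySem.Str.join "" ([] : List String) = "" := rfl
      rw [h]; simp
  | cons x t ih =>
      intro init
      simp only [List.foldl_cons, List.map_cons, join_empty_cons, ih, String.append_assoc]

lemma A_shape (letters : List String) (positions : List Int) (length : Int) :
    cw_gen_regex letters positions length
      = "^" ++ PySem.Str.join ""
          ((PySem.List.pyRange 1 (length + 1) 1).map (fA letters positions)) ++ "\\n$" := by
  unfold cw_gen_regex
  have hfun : (fun (reg : String) (i : Int) =>
      if i ∈ positions then
        reg ++ (match PySem.List.index? positions i with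
                | some j => (PySem.List.pyGet? letters (j : Int)).getD ""
                | none => "")
      else if i ∉ positions then reg ++ "[A-Za-z]" else reg)
      = fun (reg : String) (i : Int) => reg ++ fA letters positions i := by
    funext reg i
    by_cases hi : i ∈ positions <;> simp [fA, hi]
  rw [hfun, foldl_join]

lemma scatter_len (letters : List String) (length : Int) :
    ∀ (ps : List Int) (j : Nat) (chars : List String) (filled : List Bool),
      (scatterLoop letters length j ps chars filled).length = chars.length := by
  intro ps
  induction ps with
  | nil => intro j chars filled; simp [scatterLoop]
  | cons pos rest ih =>
      intro j chars filled
      unfold scatterLoop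
      split
      · rw [ih]; simp
      · exact ih _ _ _

lemma fA_append_singleton (letters : List String) (pref : List Int) (pos i : Int)
    (h : i ∈ pref ∨ i ≠ pos) :
    fA letters (pref ++ [pos]) i = fA letters pref i := by
  by_cases hi : i ∈ pref
  · rw [fA, fA, PySem.List.index?_append_of_mem _ hi]
    simp [hi]
  · have hne : i ≠ pos := h.resolve_left hi
    have hnotin : i ∉ pref ++ [pos] := by simp [hi, hne]
    simp [fA, hi, hnotin]

lemma scatter_inv (letters : List String) (length : Int) :
    ∀ (rest pref : List Int) (chars : List String) (filled : List Bool)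
      (hcl : chars.length = length.toNat) (hfl : filled.length = length.toNat)
      (hfi : ∀ (m : Nat) (hm : m < length.toNat),
        filled[m]'(by omega) = decide ((1 + (m : Int)) ∈ pref))
      (hch : ∀ (m : Nat) (hm : m < length.toNat),
        chars[m]'(by omega) = fA letters pref (1 + (m : Int)))
      (k : Nat), k < length.toNat →
        (scatterLoop letters length pref.length rest chars filled)[k]?
          = some (fA letters (pref ++ rest) (1 + (k : Int))) := by
  intro rest
  induction rest with
  | nil =>
      intro pref chars filled hcl hfl hfi hch k hk
      simp only [scatterLoop, List.append_nil]
      rw [List.getElem?_eq_getElem (by omega)]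
      exact congrArg some (hch k hk)
  | cons pos rest ih =>
      intro pref chars filled hcl hfl hfi hch k hk
      unfold scatterLoop
      split
      · -- guard true: 1 ≤ pos ≤ length and cell not yet filled
        rename_i hg
        obtain ⟨h1, h2, h3⟩ := hg
        have hn0 : (0:Int) ≤ pos - 1 := by omega
        set k0 : Nat := (pos - 1).toNat with hk0
        have hk0n : k0 < length.toNat := by omega
        have hposk0 : (1 + (k0 : Int)) = pos := by omega
        have hget : PySem.List.pyGetD filled (pos - 1) false = filled[k0]'(by omega) :=
          PySem.List.pyGetD_eq_getElem filled false hn0 (by omega)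
        have hpos_not : pos ∉ pref := by
          have hh := hfi k0 hk0n
          rw [hget, hh, hposk0] at h3
          simpa using h3
        have hmem : pos ∈ pref ++ [pos] := by simp
        have hres := ih (pref ++ [pos])
          (chars.set k0 ((PySem.List.pyGet? letters ((pref.length : Nat) : Int)).getD ""))
          (filled.set k0 true)
          (by simp [hcl]) (by simp [hfl])
          (by
            intro m hm
            rw [List.getElem_set]
            by_cases hmk : k0 = m
            · subst hmk
              simp [hposk0]
            · have hne : (1 + (m : Int)) ≠ pos := by omega
              rw [if_neg hmk, hfi m hm]
              simp [List.mem_append, hne])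
          (by
            intro m hm
            rw [List.getElem_set]
            by_cases hmk : k0 = m
            · subst hmk
              rw [if_pos rfl, hposk0]
              simp only [fA, if_pos hmem,
                PySem.List.index?_append_singleton_self pref pos hpos_not]
            · rw [if_neg hmk, hch m hm, fA_append_singleton]
              right; omega)
          k hk
        simpa using hres
      · -- guard false: nothing written
        rename_i hg
        push Not at hg
        have hstep : ∀ (m : Nat), m < length.toNat →
            ((1 + (m : Int)) ∈ pref ∨ (1 + (m : Int)) ≠ pos) := by
          intro m hm
          by_cases hin : 1 ≤ pos ∧ pos ≤ length
          · -- pos in range, so the guard failed because the cell was filled: pos ∈ pref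
            obtain ⟨h1, h2⟩ := hin
            have hn0 : (0:Int) ≤ pos - 1 := by omega
            have hk0n : (pos - 1).toNat < length.toNat := by omega
            have h3 := hg h1 h2
            have hget : PySem.List.pyGetD filled (pos - 1) false
                = filled[(pos - 1).toNat]'(by omega) :=
              PySem.List.pyGetD_eq_getElem filled false hn0 (by omega)
            have hpm : pos ∈ pref := by
              have hh := hfi (pos - 1).toNat hk0n
              rw [hget, hh] at h3
              have hmemp : ((1 + (((pos - 1).toNat : Nat) : Int)) ∈ pref) :=
                of_decide_eq_true (Bool.ne_false_iff.mp h3)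
              have heq : (1 + (((pos - 1).toNat : Nat) : Int)) = pos := by omega
              rwa [heq] at hmemp
            by_cases heq : (1 + (m : Int)) = pos
            · left; rw [heq]; exact hpm
            · right; exact heq
          · right
            push Not at hin
            omega
        have hres := ih (pref ++ [pos]) chars filled hcl hfl
          (by
            intro m hm
            rw [hfi m hm]
            rcases hstep m hm with h | h
            · simp [h, List.mem_append]
            · simp [List.mem_append, h])
          (by
            intro m hm
            rw [hch m hm, fA_append_singleton]
            exact hstep m hm)
          k hk
        simpa using hres

-- ===== VERDICT (by name: the statement is the Claim_ definition above) =====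
theorem cw_gen_regex_spec : Claim_equal_cw_gen_regex := by
  intro letters positions length _ _
  unfold Spec_cw_gen_regex
  rw [A_shape]
  simp only [cw_gen_regex_alt]
  have hlist : (PySem.List.pyRange 1 (length + 1) 1).map (fA letters positions)
      = scatterLoop letters length 0 positions
          (List.replicate length.toNat "[A-Za-z]") (List.replicate length.toNat false) := by
    apply List.ext_getElem?
    intro k
    by_cases hk : k < length.toNat
    · have hinv := scatter_inv letters length positions []
        (List.replicate length.toNat "[A-Za-z]") (List.replicate length.toNat false)
        (by simp) (by simp)
        (by intro m hm; simp)
        (by intro m hm; simp [fA])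
        k hk
      simp only [List.length_nil, List.nil_append] at hinv
      rw [hinv, List.getElem?_map, PySem.List.getElem?_pyRange_one]
      have h1 : (length + 1 - 1).toNat = length.toNat := by omega
      rw [h1, if_pos hk]
      rfl
    · have hlen1 : ((PySem.List.pyRange 1 (length + 1) 1).map (fA letters positions)).length
          = length.toNat := by
        simp only [List.length_map, PySem.List.length_pyRange_one]
        omega
      have hlen2 : (scatterLoop letters length 0 positions
          (List.replicate length.toNat "[A-Za-z]") (List.replicate length.toNat false)).length
          = length.toNat := by
        rw [scatter_len]; simp
      rw [List.getElem?_eq_none (by omega), List.getElem?_eq_none (by omega)]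
  rw [hlist]
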